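-- pv_equiv track=rewrite | github.com/graceHach/Polar_Autocorrelation | src/polarAC_utils.py | second_derivative_test
-- ===== SOURCE A (Python) =====
-- def count_sign_changes(dataset):
--     """
--     Counts the number of times a 1D list of numbers changes sign
--     Input: dataset, list of numbers
--     Output: # of sign changes of dataset
--     """
--     sign_changes = 0
--     for i in range(len(dataset)-1):
--         if dataset[i]*dataset[i+1] <= 0:
--             sign_changes = sign_changes+1
--     return sign_changes
--
-- def second_derivative_test(dataset):
--     """
--     Number of times dataset changes concavity (second derivative changes sign)
--     Input: dataset, list of numbers
--     Output: number of sign changes of second derivative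
--     """
--     derivative = []
--     second_derivative = []
--     for i in range(len(dataset)-1):
--         dx = dataset[i+1]-dataset[i]
--         derivative.append(dx)
--     for i in range(len(derivative)-1):
--         d2x = derivative[i+1]-derivative[i]
--         second_derivative.append(d2x)
--     return count_sign_changes(second_derivative)
-- ===== SOURCE B (Python) =====
-- def second_derivative_test(dataset):
--     n = len(dataset)
--     if n < 4:
--         return 0
--     # sign sequence of the second differences (ints: a - 2b + c is exact)
--     sgn = []
--     for i in range(n - 2):
--         d2 = dataset[i] - 2 * dataset[i + 1] + dataset[i + 2]
--         sgn.append((d2 > 0) - (d2 < 0))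
--     # complementary count: a pair of consecutive second differences is NOT a
--     # sign change (product > 0) exactly when both have the same nonzero sign
--     same = sum(1 for s, t in zip(sgn, sgn[1:]) if s == t and s != 0)
--     return (n - 3) - same
-- ===== Notes on version B (the rewrite author's own statement) =====
-- stated objective: alternative
-- what changed: B counts by complement over a sign sequence: it maps each window to the sign of a-2b+c, counts adjacent pairs with equal nonzero sign (the non-changes), and returns (n-3) minus that, instead of A's building of first- and second-difference lists and direct counting of pairs with product <= 0.
import Mathlib
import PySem

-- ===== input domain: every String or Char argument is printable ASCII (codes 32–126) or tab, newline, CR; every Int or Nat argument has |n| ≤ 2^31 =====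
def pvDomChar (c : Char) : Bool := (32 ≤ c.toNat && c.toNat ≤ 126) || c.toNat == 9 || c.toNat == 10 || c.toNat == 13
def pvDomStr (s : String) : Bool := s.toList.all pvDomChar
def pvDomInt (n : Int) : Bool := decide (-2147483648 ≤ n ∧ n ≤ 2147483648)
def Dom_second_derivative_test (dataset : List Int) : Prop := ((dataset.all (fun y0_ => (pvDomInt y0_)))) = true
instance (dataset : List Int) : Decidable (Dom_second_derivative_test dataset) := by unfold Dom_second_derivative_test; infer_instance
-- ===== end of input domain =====

-- B counts concavity changes by complement: it builds the sign sequence of the windows a-2b+c,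
-- counts adjacent equal-nonzero-sign pairs (the non-changes) and returns (n-3) minus that,
-- instead of A's two difference lists and direct product<=0 counting (objective: alternative).


-- ===== PORT A =====
def count_sign_changes (dataset : List Int) : Int :=
  (PySem.List.pyRange 0 ((dataset.length : Int) - 1) 1).foldl
    (fun sign_changes i =>
      if PySem.List.pyGetD dataset i 0 * PySem.List.pyGetD dataset (i + 1) 0 ≤ 0 then
        sign_changes + 1
      else sign_changes) 0

def second_derivative_test (dataset : List Int) : Int :=
  let derivative :=
    (PySem.List.pyRange 0 ((dataset.length : Int) - 1) 1).foldl
      (fun acc i => acc ++ [PySem.List.pyGetD dataset (i + 1) 0 - PySem.List.pyGetD dataset i 0]) []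
  let second_derivative :=
    (PySem.List.pyRange 0 ((derivative.length : Int) - 1) 1).foldl
      (fun acc i => acc ++ [PySem.List.pyGetD derivative (i + 1) 0 - PySem.List.pyGetD derivative i 0]) []
  count_sign_changes second_derivative

-- ===== PORT B =====
-- (d2 > 0) - (d2 < 0) from Source B
def sgnOf (x : Int) : Int := (if 0 < x then 1 else 0) - (if x < 0 then 1 else 0)

def second_derivative_test_alt (dataset : List Int) : Int :=
  let n := dataset.length
  if n < 4 then 0
  else
    let sgn := (List.range (n - 2)).map (fun i =>
      sgnOf (dataset.getD i 0 - 2 * dataset.getD (i + 1) 0 + dataset.getD (i + 2) 0))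
    let same := ((sgn.zip sgn.tail).filter (fun p => p.1 == p.2 && p.1 != 0)).length
    ((n : Int) - 3) - (same : Int)

-- ===== PRECONDITION & SPEC =====
def Spec_second_derivative_test (dataset : List Int) (out : Int) : Prop := out = second_derivative_test_alt dataset
instance (dataset : List Int) (out : Int) : Decidable (Spec_second_derivative_test dataset out) := by unfold Spec_second_derivative_test; infer_instance

-- ===== CLAIM (what is proved, stated in full; the proofs are below) =====
def Claim_equal_second_derivative_test : Prop := ∀ (dataset : List Int), Dom_second_derivative_test dataset → Spec_second_derivative_test dataset (second_derivative_test dataset)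

-- ===== LEMMAS AND PROOFS =====

-- structural difference list and structural sign-change count (proof vocabulary)
def diffsP : List Int → List Int
  | a :: b :: t => (b - a) :: diffsP (b :: t)
  | _ => []

def cscP : List Int → Int
  | x :: y :: t => (if x * y ≤ 0 then 1 else 0) + cscP (y :: t)
  | _ => 0

-- structural count of adjacent same-nonzero-sign pairs
def sameP : List Int → Nat
  | x :: y :: t => (if sgnOf x = sgnOf y ∧ sgnOf x ≠ 0 then 1 else 0) + sameP (y :: t)
  | _ => 0

-- the adjacent-index view of a list is its zip with its tail
lemma map_adj (s : List Int) (f : Int → Int → Int) :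
    (PySem.List.pyRange 0 ((s.length : Int) - 1) 1).map
      (fun i => f (PySem.List.pyGetD s i 0) (PySem.List.pyGetD s (i + 1) 0))
    = (s.zip s.tail).map (fun p => f p.1 p.2) := by
  apply List.ext_getElem
  · simp only [List.length_map, PySem.List.length_pyRange_one, List.length_zip, List.length_tail]
    omega
  · intro i h1 h2
    have hlen : i < s.length - 1 := by
      simp only [List.length_map, PySem.List.length_pyRange_one] at h1; omega
    have hi : i < s.length := by omega
    have hi1 : i + 1 < s.length := by omega
    have hr : i < (PySem.List.pyRange 0 ((s.length : Int) - 1) 1).length := by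
      simp only [PySem.List.length_pyRange_one]; omega
    simp only [List.getElem_map]
    rw [PySem.List.getElem_pyRange_one 0 _ i hr, zero_add]
    have e1 : PySem.List.pyGetD s (i : Int) 0 = s[i] := by
      rw [PySem.List.pyGetD_eq_getElem s 0 (by positivity) (by exact_mod_cast hi)]
      simp
    have e2 : PySem.List.pyGetD s ((i : Int) + 1) 0 = s[i + 1] := by
      rw [PySem.List.pyGetD_eq_getElem s 0 (by positivity) (by exact_mod_cast hi1)]
      simp only [show ((i : Int) + 1).toNat = i + 1 by omega]
    rw [e1, e2]
    simp [List.getElem_zip, List.getElem_tail]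

lemma diffsP_eq_zip (s : List Int) :
    diffsP s = (s.zip s.tail).map (fun p => p.2 - p.1) := by
  induction s with
  | nil => simp [diffsP]
  | cons a t ih =>
    cases t with
    | nil => simp [diffsP]
    | cons b t' => simp [diffsP] at ih ⊢; exact ih

lemma cscP_foldl (s : List Int) (c : Int) :
    (s.zip s.tail).foldl (fun sc p => if p.1 * p.2 ≤ 0 then sc + 1 else sc) c
    = c + cscP s := by
  induction s generalizing c with
  | nil => simp [cscP]
  | cons a t ih =>
    cases t with
    | nil => simp [cscP]
    | cons b t' =>
      have ih' := ih (if a * b ≤ 0 then c + 1 else c)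
      simp only [List.tail_cons] at ih' ⊢
      simp only [List.zip_cons_cons, List.foldl_cons]
      rw [ih', cscP]
      split_ifs <;> ring

lemma count_sign_changes_eq (s : List Int) : count_sign_changes s = cscP s := by
  unfold count_sign_changes
  have hm := map_adj s (fun x y => x * y)
  calc (PySem.List.pyRange 0 ((s.length : Int) - 1) 1).foldl
        (fun sc i => if PySem.List.pyGetD s i 0 * PySem.List.pyGetD s (i + 1) 0 ≤ 0 then sc + 1 else sc) 0
      = ((PySem.List.pyRange 0 ((s.length : Int) - 1) 1).map
          (fun i => PySem.List.pyGetD s i 0 * PySem.List.pyGetD s (i + 1) 0)).foldl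
          (fun sc x => if x ≤ 0 then sc + 1 else sc) (0 : Int) := by
        rw [List.foldl_map]
    _ = ((s.zip s.tail).map (fun p => p.1 * p.2)).foldl
          (fun sc x => if x ≤ 0 then sc + 1 else sc) (0 : Int) := by rw [hm]
    _ = (s.zip s.tail).foldl (fun sc p => if p.1 * p.2 ≤ 0 then sc + 1 else sc) (0 : Int) := by
        rw [List.foldl_map]
    _ = cscP s := by rw [cscP_foldl]; ring

lemma derivative_foldl_eq (s : List Int) :
    (PySem.List.pyRange 0 ((s.length : Int) - 1) 1).foldl
      (fun acc i => acc ++ [PySem.List.pyGetD s (i + 1) 0 - PySem.List.pyGetD s i 0]) []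
    = diffsP s := by
  rw [PySem.List.foldl_append_singleton_eq_map, List.nil_append]
  rw [map_adj s (fun x y => y - x), diffsP_eq_zip]

-- A computes exactly the structural second-difference sign-change count
lemma A_eq (l : List Int) : second_derivative_test l = cscP (diffsP (diffsP l)) := by
  unfold second_derivative_test
  simp only [derivative_foldl_eq, count_sign_changes_eq]

lemma length_diffsP : ∀ s : List Int, (diffsP s).length = s.length - 1
  | [] => rfl
  | [_] => rfl
  | a :: b :: t => by
      simp only [diffsP, List.length_cons, length_diffsP (b :: t)]
      omega

lemma getElem_diffsP : ∀ (s : List Int) (i : Nat) (h : i < (diffsP s).length),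
    (diffsP s)[i] = s.getD (i + 1) 0 - s.getD i 0
  | a :: b :: t, 0, _ => by simp [diffsP]
  | a :: b :: t, i + 1, h => by
      have h' : i < (diffsP (b :: t)).length := by
        simpa [diffsP] using h
      simp only [diffsP, List.getElem_cons_succ]
      rw [getElem_diffsP (b :: t) i h']
      simp

-- sign facts
lemma sgn_neg {x : Int} (h : x < 0) : sgnOf x = -1 := by
  simp [sgnOf, h, not_lt.mpr h.le]

lemma sgn_pos {x : Int} (h : 0 < x) : sgnOf x = 1 := by
  simp [sgnOf, h, not_lt.mpr h.le]

-- each adjacent pair is either a sign change (product ≤ 0) or a same-nonzero-sign pair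
lemma pair_sum (x y : Int) :
    (if x * y ≤ 0 then (1 : Int) else 0)
      + (if sgnOf x = sgnOf y ∧ sgnOf x ≠ 0 then (1 : Int) else 0) = 1 := by
  rcases lt_trichotomy x 0 with hx | hx | hx
  · rcases lt_trichotomy y 0 with hy | hy | hy
    · have hp : 0 < x * y := mul_pos_of_neg_of_neg hx hy
      rw [if_neg (not_le.mpr hp),
        if_pos ⟨(sgn_neg hx).trans (sgn_neg hy).symm, by rw [sgn_neg hx]; norm_num⟩]
      norm_num
    · subst hy
      rw [if_pos (by simp), if_neg (by rw [sgn_neg hx]; simp [sgnOf])]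
      norm_num
    · have hp : x * y < 0 := mul_neg_of_neg_of_pos hx hy
      rw [if_pos hp.le, if_neg (by rw [sgn_neg hx, sgn_pos hy]; norm_num)]
      norm_num
  · subst hx
    rw [if_pos (by simp), if_neg (by simp [sgnOf])]
    norm_num
  · rcases lt_trichotomy y 0 with hy | hy | hy
    · have hp : x * y < 0 := mul_neg_of_pos_of_neg hx hy
      rw [if_pos hp.le, if_neg (by rw [sgn_neg hy, sgn_pos hx]; norm_num)]
      norm_num
    · subst hy
      rw [if_pos (by simp), if_neg (by rw [sgn_pos hx]; simp [sgnOf])]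
      norm_num
    · have hp : 0 < x * y := mul_pos hx hy
      rw [if_neg (not_le.mpr hp),
        if_pos ⟨(sgn_pos hx).trans (sgn_pos hy).symm, by rw [sgn_pos hx]; norm_num⟩]
      norm_num

-- complementary counting: changes + non-changes = number of adjacent pairs
lemma csc_add_same : ∀ s : List Int, s ≠ [] → cscP s + (sameP s : Int) = (s.length : Int) - 1
  | [], h => absurd rfl h
  | [x], _ => by simp [cscP, sameP]
  | x :: y :: t, _ => by
      have ih := csc_add_same (y :: t) (by simp)
      simp only [cscP, sameP, List.length_cons] at ih ⊢
      push_cast at ih ⊢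
      have hp := pair_sum x y
      split_ifs at hp ⊢ <;> omega

-- B's sign list is the sign image of the structural second differences
lemma sgn_map_eq (l : List Int) :
    (List.range (l.length - 2)).map (fun i =>
        sgnOf (l.getD i 0 - 2 * l.getD (i + 1) 0 + l.getD (i + 2) 0))
    = (diffsP (diffsP l)).map sgnOf := by
  apply List.ext_getElem
  · simp [length_diffsP]
    omega
  · intro i h1 h2
    have hlen : i < (diffsP (diffsP l)).length := by
      simpa using h2
    have hlen' : i + 1 < (diffsP l).length := by
      simp [length_diffsP] at hlen ⊢; omega
    have hl : i + 2 < l.length := by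
      simp [length_diffsP] at hlen; omega
    simp only [List.getElem_map, List.getElem_range]
    congr 1
    rw [getElem_diffsP _ i hlen]
    have g1 : (diffsP l).getD (i + 1) 0 = (diffsP l)[i + 1] :=
      List.getD_eq_getElem _ _ hlen'
    have g0 : (diffsP l).getD i 0 = (diffsP l)[i] :=
      List.getD_eq_getElem _ _ (by omega)
    rw [g1, g0, getElem_diffsP _ (i + 1) hlen', getElem_diffsP _ i (by omega)]
    ring

-- the zip/filter count in B is the structural sameP of the underlying values
lemma filter_zip_eq : ∀ s : List Int,
    (((s.map sgnOf).zip (s.map sgnOf).tail).filter (fun p => p.1 == p.2 && p.1 != 0)).length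
    = sameP s
  | [] => by simp [sameP]
  | [x] => by simp [sameP]
  | x :: y :: t => by
      have ih := filter_zip_eq (y :: t)
      by_cases h : sgnOf x = sgnOf y ∧ sgnOf x ≠ 0
      · have h2' : sgnOf y ≠ 0 := h.1 ▸ h.2
        have hb : ((sgnOf x == sgnOf y) && (sgnOf x != 0)) = true := by
          simp [h.1, h2']
        simp only [List.map_cons, List.tail_cons, List.zip_cons_cons, List.filter_cons,
          hb, if_true, List.length_cons, sameP, if_pos h]
        simp only [List.map_cons, List.tail_cons] at ih
        omega
      · have hb : ((sgnOf x == sgnOf y) && (sgnOf x != 0)) = false := by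
          rcases not_and_or.mp h with h' | h'
          · simp [h']
          · simp [not_ne_iff.mp h']
        simp only [List.map_cons, List.tail_cons, List.zip_cons_cons, List.filter_cons,
          hb, Bool.false_eq_true, if_false, sameP, if_neg h]
        simp only [List.map_cons, List.tail_cons] at ih
        omega

lemma cscP_short (s : List Int) (h : s.length ≤ 1) : cscP s = 0 := by
  match s, h with
  | [], _ => rfl
  | [_], _ => rfl

-- ===== VERDICT (by name: the statement is the Claim_ definition above) =====
theorem second_derivative_test_spec : Claim_equal_second_derivative_test := by
  intro l _
  unfold Spec_second_derivative_test second_derivative_test_alt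
  rw [A_eq]
  by_cases hn : l.length < 4
  · rw [if_pos hn]
    apply cscP_short
    rw [length_diffsP, length_diffsP]; omega
  · rw [if_neg hn]
    simp only [sgn_map_eq, filter_zip_eq]
    have hne : diffsP (diffsP l) ≠ [] := by
      intro h
      have := length_diffsP (diffsP l)
      rw [h, length_diffsP] at this
      simp at this; omega
    have hs := csc_add_same _ hne
    have hl2 : ((diffsP (diffsP l)).length : Int) = (l.length : Int) - 2 := by
      rw [length_diffsP, length_diffsP]; omega
    rw [hl2] at hs
    omega
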